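-- pv_equiv track=rewrite | github.com/posit-dev/open-source-website | scripts/extract-software-colors.py | insert_color_after_image
-- ===== SOURCE A (Python) =====
-- def insert_color_after_image(content: str, hex_color: str) -> str:
--     """Insert a `color:` line directly after the `image:` line in raw file text."""
--     lines = content.split("\n")
--     result = []
--     for line in lines:
--         result.append(line)
--         if line.startswith("image:"):
--             result.append(f'color: "{hex_color}"')
--     return "\n".join(result)
-- ===== SOURCE B (Python) =====
-- import re
--
-- def insert_color_after_image(content: str, hex_color: str) -> str:
--     """Insert a `color:` line directly after the `image:` line in raw file text."""
--     return re.sub(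
--         r"^image:.*$",
--         lambda m: m.group(0) + '\ncolor: "' + hex_color + '"',
--         content,
--         flags=re.MULTILINE,
--     )
-- ===== Notes on version B (the rewrite author's own statement) =====
-- stated objective: idiomatic
-- what changed: Replaces A's split-into-lines / explicit loop with accumulator list / join pipeline by a single line-anchored regex substitution (re.sub with ^image:.*$ and re.MULTILINE, using a callable replacement so hex_color is inserted verbatim).
import Mathlib
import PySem

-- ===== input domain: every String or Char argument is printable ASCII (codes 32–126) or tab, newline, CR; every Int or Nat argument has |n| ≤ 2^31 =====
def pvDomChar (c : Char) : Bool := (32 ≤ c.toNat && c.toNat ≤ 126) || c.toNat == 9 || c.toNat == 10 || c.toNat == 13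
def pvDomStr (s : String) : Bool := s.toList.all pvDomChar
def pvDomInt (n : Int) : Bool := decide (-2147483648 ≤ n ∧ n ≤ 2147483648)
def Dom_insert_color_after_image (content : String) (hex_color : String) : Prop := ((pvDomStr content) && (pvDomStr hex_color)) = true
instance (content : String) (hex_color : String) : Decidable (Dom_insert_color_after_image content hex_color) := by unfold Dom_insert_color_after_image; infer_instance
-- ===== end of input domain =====

-- B replaces A's split/loop/accumulator/join with a single line-anchored pattern substitution
-- (re.sub with ^image:.*$ MULTILINE); objective: idiomatic, same return value everywhere.

-- ===== PORT A =====
def insert_color_after_image (content : String) (hex_color : String) : String :=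
  let lines := PySem.Chars.splitOn content.toList "\n".toList
  let colorLine : List Char := "color: \"".toList ++ hex_color.toList ++ "\"".toList
  let result := lines.foldl (fun res line =>
      let res1 := res ++ [line]
      if PySem.Chars.startswith line "image:".toList then res1 ++ [colorLine] else res1) []
  String.ofList (PySem.Chars.join "\n".toList result)

-- ===== PORT B =====
/-- Hand port of B's single `re.sub(r"^image:.*$", lambda m: m.group(0) + '\ncolor: "…"',
content, flags=re.MULTILINE)`: a left-to-right scan over the text; at each line start
(start of string or just after a `'\n'`) the pattern `image:.*$` matches exactly when the
line starts with `"image:"`, the match is then the whole line (up to the next `'\n'` or the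
end), and the replacement re-emits the matched line followed by the color line; the scan
resumes after the match. Exact for this fixed pattern/replacement (the replacement is a
callable, so no template escapes apply). -/
def subImageGo (color : List Char) (cs : List Char) : List Char :=
  let line := cs.takeWhile (fun c => c ≠ '\n')
  let pre := if PySem.Chars.startswith cs "image:".toList then line ++ '\n' :: color else line
  match h : cs.drop line.length with
  | [] => pre
  | _ :: rest => pre ++ '\n' :: subImageGo color rest
termination_by cs.length
decreasing_by
  have hlen := congrArg List.length h
  simp only [List.length_drop, List.length_cons] at hlen
  omega

def insert_color_after_image_alt (content : String) (hex_color : String) : String :=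
  String.ofList (subImageGo ("color: \"".toList ++ hex_color.toList ++ "\"".toList) content.toList)

-- ===== PRECONDITION & SPEC =====
def Spec_insert_color_after_image (content : String) (hex_color : String) (out : String) : Prop := out = insert_color_after_image_alt content hex_color
instance (content : String) (hex_color : String) (out : String) : Decidable (Spec_insert_color_after_image content hex_color out) := by unfold Spec_insert_color_after_image; infer_instance

-- ===== CLAIM (what is proved, stated in full; the proofs are below) =====
def Claim_equal_insert_color_after_image : Prop := ∀ (content : String) (hex_color : String), Dom_insert_color_after_image content hex_color → Spec_insert_color_after_image content hex_color (insert_color_after_image content hex_color)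

-- ===== LEMMAS AND PROOFS =====

/-- Prepend a prefix onto the head chunk of a chunk list. -/
def consHead (p : List Char) : List (List Char) → List (List Char)
  | [] => [p]
  | h :: t => (p ++ h) :: t

/-- Structural form of Python's `s.split("\n")`. -/
def mySplit : List Char → List (List Char)
  | [] => [[]]
  | c :: rest => if c = '\n' then [] :: mySplit rest else consHead [c] (mySplit rest)

theorem mySplit_ne_nil (cs : List Char) : mySplit cs ≠ [] := by
  cases cs with
  | nil => simp [mySplit]
  | cons c rest =>
    simp only [mySplit]
    split_ifs
    · simp
    · cases h : mySplit rest <;> simp [consHead]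

theorem splitOn_go_newline (l : List Char) : ∀ (fuel : Nat) (cur : List Char)
    (acc : List (List Char)), l.length ≤ fuel →
    PySem.Chars.splitOn.go ['\n'] fuel l cur acc = acc.reverse ++ consHead cur.reverse (mySplit l) := by
  induction l with
  | nil =>
    intro fuel cur acc _
    cases fuel with
    | zero => rw [PySem.Chars.splitOn.go]; simp [mySplit, consHead]
    | succ f =>
      rw [PySem.Chars.splitOn.go]
      simp [mySplit, consHead]
      omega
  | cons c rest ih =>
    intro fuel cur acc hle
    cases fuel with
    | zero => simp at hle
    | succ f =>
      rw [PySem.Chars.splitOn.go]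
      by_cases hc : c = '\n'
      · subst hc
        have hpre : (['\n'] : List Char).isPrefixOf ('\n' :: rest) = true := by
          simp [List.isPrefixOf]
        rw [hpre, if_pos rfl]
        show PySem.Chars.splitOn.go ['\n'] f rest [] (cur.reverse :: acc) = _
        rw [ih f [] (cur.reverse :: acc) (by simpa using hle)]
        simp only [mySplit, List.reverse_cons, List.append_assoc, List.singleton_append]
        cases hms : mySplit rest with
        | nil => exact absurd hms (mySplit_ne_nil rest)
        | cons a t => simp [consHead]
      · have hpre : (['\n'] : List Char).isPrefixOf (c :: rest) = false := by
          simp [List.isPrefixOf]; exact fun h => hc h.symm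
        rw [hpre]
        simp only [Bool.false_eq_true, if_false]
        rw [ih f (c :: cur) acc (by simpa using hle)]
        simp only [mySplit, if_neg hc, List.reverse_cons]
        congr 1
        cases hms : mySplit rest <;> simp [consHead]

theorem splitOn_eq_mySplit (cs : List Char) :
    PySem.Chars.splitOn cs ['\n'] = mySplit cs := by
  rw [PySem.Chars.splitOn, splitOn_go_newline cs (cs.length + 1) [] [] (by omega)]
  cases h : mySplit cs with
  | nil => exact absurd h (mySplit_ne_nil cs)
  | cons a t => simp [consHead]

/-- The chunks A's loop body emits for one line. -/
def fLine (color line : List Char) : List (List Char) :=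
  if PySem.Chars.startswith line "image:".toList then [line, color] else [line]

theorem fLine_ne_nil (color line : List Char) : fLine color line ≠ [] := by
  unfold fLine; split_ifs <;> simp

theorem foldl_eq_flatMap (color : List Char) (lines : List (List Char)) :
    ∀ (acc : List (List Char)),
    lines.foldl (fun res line =>
      let res1 := res ++ [line]
      if PySem.Chars.startswith line "image:".toList then res1 ++ [color] else res1) acc
    = acc ++ lines.flatMap (fLine color) := by
  induction lines with
  | nil => intro acc; simp
  | cons l rest ih =>
    intro acc
    rw [List.foldl_cons, ih]
    simp only [List.flatMap_cons, fLine]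
    split_ifs with h <;> simp

theorem flatMap_fLine_ne_nil (color : List Char) (cs : List Char) :
    (mySplit cs).flatMap (fLine color) ≠ [] := by
  cases h : mySplit cs with
  | nil => exact absurd h (mySplit_ne_nil cs)
  | cons a t =>
    simp only [List.flatMap_cons, ne_eq, List.append_eq_nil_iff, not_and]
    intro hf
    exact absurd hf (fLine_ne_nil color a)

theorem isPrefixOf_takeWhile (p : List Char) (hp : '\n' ∉ p) :
    ∀ cs : List Char, p.isPrefixOf (cs.takeWhile (fun c => c ≠ '\n')) = p.isPrefixOf cs := by
  induction p with
  | nil => intro cs; simp [List.isPrefixOf]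
  | cons a p' ih =>
    intro cs
    have ha : a ≠ '\n' := fun h => hp (h ▸ List.mem_cons_self)
    have hp' : '\n' ∉ p' := fun h => hp (List.mem_cons_of_mem _ h)
    cases cs with
    | nil => simp
    | cons c cs' =>
      by_cases hc : c = '\n'
      · subst hc
        have hac : (a == '\n') = false := by simpa using ha
        simp [List.isPrefixOf, hac]
      · have hrec := ih hp' cs'
        simp only [ne_eq, decide_not] at hrec
        simp only [List.takeWhile_cons, ne_eq, decide_not, hc, decide_false, Bool.not_false,
          if_true, List.isPrefixOf_cons₂, hrec]

theorem startswith_image_line (cs : List Char) :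
    PySem.Chars.startswith (cs.takeWhile (fun c => c ≠ '\n')) "image:".toList
      = PySem.Chars.startswith cs "image:".toList := by
  have : ('\n' : Char) ∉ "image:".toList := by decide
  simp only [PySem.Chars.startswith]
  exact isPrefixOf_takeWhile _ this cs

theorem mySplit_step (cs : List Char) :
    mySplit cs = (cs.takeWhile (fun c => c ≠ '\n')) ::
      (match cs.drop ((cs.takeWhile (fun c => c ≠ '\n')).length) with
        | [] => ([] : List (List Char))
        | _ :: rest => mySplit rest) := by
  induction cs with
  | nil => simp [mySplit]
  | cons c rest ih =>
    by_cases hc : c = '\n'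
    · subst hc; simp [mySplit]
    · simp only [mySplit, List.takeWhile_cons, ne_eq, decide_not, hc, decide_false,
        Bool.not_false, if_true, List.length_cons, List.drop_succ_cons]
      rw [ih]
      simp [consHead]

theorem key (color : List Char) (cs : List Char) :
    PySem.Chars.join ['\n'] ((mySplit cs).flatMap (fLine color)) = subImageGo color cs := by
  rw [mySplit_step cs, subImageGo]
  split
  next heq =>
    rw [heq]
    simp only [List.flatMap_cons, List.flatMap_nil, List.append_nil, fLine, startswith_image_line]
    split_ifs with h
    · rw [PySem.Chars.join_cons_cons, PySem.Chars.join_singleton]; simp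
    · rw [PySem.Chars.join_singleton]
  next d rest heq =>
    rw [heq]
    have ihr := key color rest
    simp only [List.flatMap_cons, fLine, startswith_image_line]
    cases hfm : (mySplit rest).flatMap (fLine color) with
    | nil => exact absurd hfm (flatMap_fLine_ne_nil color rest)
    | cons m t =>
      rw [hfm] at ihr
      split_ifs with h
      · simp only [List.cons_append, List.nil_append]
        rw [PySem.Chars.join_cons_cons, PySem.Chars.join_cons_cons, ihr]
        simp
      · simp only [List.cons_append, List.nil_append]
        rw [PySem.Chars.join_cons_cons, ihr]
        simp
termination_by cs.length
decreasing_by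
  rename_i heq'
  have hlen := congrArg List.length heq'
  simp only [List.length_drop, List.length_cons] at hlen
  omega

-- ===== VERDICT (by name: the statement is the Claim_ definition above) =====
theorem insert_color_after_image_spec : Claim_equal_insert_color_after_image := by
  intro content hex_color _
  show _ = _
  unfold insert_color_after_image insert_color_after_image_alt
  have hnl : ("\n".toList : List Char) = ['\n'] := rfl
  simp only [hnl, splitOn_eq_mySplit, foldl_eq_flatMap, List.nil_append, key]
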